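-- pv_equiv track=rewrite | github.com/Jiawei-Wang/LeetCode-Study | Maximum Units.py | maxUnits
-- ===== SOURCE A (Python) =====
-- import heapq
--
-- def maxUnits(num, boxes, unitSize, unitsPerBox, truckSize):
--     heap = []
--
--     for i in range(num):
--         units_per_box = unitsPerBox[i]
--         heapq.heappush(heap, (-units_per_box, boxes[i]))
--
--     ret = 0
--     while truckSize > 0 and heap:
--         curr_max = heapq.heappop(heap)
--         max_boxes = min(truckSize, curr_max[1])
--         truckSize -= max_boxes
--         ret += max_boxes * (curr_max[0] * -1)
--
--     return ret
-- ===== SOURCE B (Python) =====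
-- def maxUnits(num, boxes, unitSize, unitsPerBox, truckSize):
--     pairs = sorted(((unitsPerBox[i], boxes[i]) for i in range(num)),
--                    key=lambda p: (-p[0], p[1]))
--     ret = 0
--     for u, b in pairs:
--         if truckSize <= 0:
--             break
--         take = min(truckSize, b)
--         truckSize -= take
--         ret += take * u
--     return ret
-- ===== Notes on version B (the rewrite author's own statement) =====
-- stated objective: simpler
-- what changed: Replaces the heap build plus pop-loop with one sort of (units, boxes) pairs by key (-units, boxes) followed by a single greedy pass that stops when the truck is full.
import Mathlib
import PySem

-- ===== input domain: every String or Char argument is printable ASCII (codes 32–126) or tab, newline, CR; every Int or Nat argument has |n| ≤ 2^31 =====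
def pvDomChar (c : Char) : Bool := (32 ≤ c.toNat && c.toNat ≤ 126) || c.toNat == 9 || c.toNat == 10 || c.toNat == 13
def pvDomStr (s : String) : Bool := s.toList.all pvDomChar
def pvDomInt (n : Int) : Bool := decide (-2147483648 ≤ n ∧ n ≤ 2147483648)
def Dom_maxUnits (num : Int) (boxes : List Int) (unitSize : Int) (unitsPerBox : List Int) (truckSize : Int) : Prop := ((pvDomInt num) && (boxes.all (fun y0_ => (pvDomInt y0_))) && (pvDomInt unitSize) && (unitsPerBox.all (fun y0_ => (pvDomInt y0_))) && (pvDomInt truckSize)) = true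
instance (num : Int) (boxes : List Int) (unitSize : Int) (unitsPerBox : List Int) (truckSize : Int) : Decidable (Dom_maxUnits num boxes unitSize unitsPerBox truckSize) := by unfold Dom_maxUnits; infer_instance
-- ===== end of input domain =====

-- B replaces A's heap build + pop loop by one sort of the (units, boxes) pairs in heap order
-- (key (-units, boxes)) followed by a single greedy pass: simpler, same O(n log n) cost.

-- ===== PORT A =====
-- A uses heapq on tuples; ported by hand as a binary min-heap over a List (Int × Int),
-- exact w.r.t. Python's tuple comparison (pvPltB is '<' on int pairs) and heapq's pop order.

-- Python '<' on int 2-tuples (lexicographic).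
def pvPltB (a b : Int × Int) : Bool := decide (a.1 < b.1) || (decide (a.1 = b.1) && decide (a.2 < b.2))

-- heap[i] (in the algorithms below every access is in range; default never read).
def pvHget (h : List (Int × Int)) (i : Nat) : Int × Int := h.getD i (0, 0)

-- exchange positions i and j
def pvHswap (h : List (Int × Int)) (i j : Nat) : List (Int × Int) :=
  (h.set i (pvHget h j)).set j (pvHget h i)

def pvHpar (i : Nat) : Nat := (i - 1) / 2

theorem pvHswap_length (h : List (Int × Int)) (i j : Nat) : (pvHswap h i j).length = h.length := by
  simp [pvHswap]

-- heapq._siftdown (bubble the element at pos up; parent shifting written as swaps — same array)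
def pvSiftUp (h : List (Int × Int)) (pos : Nat) : List (Int × Int) :=
  if h0 : pos = 0 then h
  else if pvPltB (pvHget h pos) (pvHget h (pvHpar pos)) then
    pvSiftUp (pvHswap h pos (pvHpar pos)) (pvHpar pos)
  else h
termination_by pos
decreasing_by simp [pvHpar]; omega

-- heapq.heappush
def pvHpush (h : List (Int × Int)) (x : Int × Int) : List (Int × Int) :=
  pvSiftUp (h ++ [x]) h.length

-- index of the smallest among pos and its (existing) children
def pvSdChild1 (h : List (Int × Int)) (pos : Nat) : Nat :=
  if 2 * pos + 1 < h.length ∧ pvPltB (pvHget h (2 * pos + 1)) (pvHget h pos) then 2 * pos + 1 else pos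

def pvSdChild (h : List (Int × Int)) (pos : Nat) : Nat :=
  if 2 * pos + 2 < h.length ∧ pvPltB (pvHget h (2 * pos + 2)) (pvHget h (pvSdChild1 h pos)) then 2 * pos + 2
  else pvSdChild1 h pos

theorem pvSdChild_lt (h : List (Int × Int)) (pos : Nat) (hc : pvSdChild h pos ≠ pos) :
    pos < pvSdChild h pos ∧ pvSdChild h pos < h.length := by
  unfold pvSdChild pvSdChild1 at *
  split_ifs at * <;> omega

-- heapq._siftup (restore the heap below pos; CPython's leaf-chase is an optimisation of this
-- min-child swap loop — both restore the same heap order, so pops return the same values)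
def pvSiftDown (h : List (Int × Int)) (pos : Nat) : List (Int × Int) :=
  if hc : pvSdChild h pos = pos then h
  else pvSiftDown (pvHswap h pos (pvSdChild h pos)) (pvSdChild h pos)
termination_by h.length - pos
decreasing_by
  have := pvSdChild_lt h pos hc
  rw [pvHswap_length]
  omega

theorem pvSiftDown_length (h : List (Int × Int)) (pos : Nat) : (pvSiftDown h pos).length = h.length := by
  fun_induction pvSiftDown with
  | case1 => rfl
  | case2 h pos hc ih => rw [ih, pvHswap_length]

-- heapq.heappop (called only on a nonempty heap, as in A's while loop)
def pvHpop (h : List (Int × Int)) : (Int × Int) × List (Int × Int) :=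
  if h.length ≤ 1 then (pvHget h 0, [])
  else (pvHget h 0, pvSiftDown ((h.take (h.length - 1)).set 0 (pvHget h (h.length - 1))) 0)

theorem pvHpop_length (h : List (Int × Int)) (hne : h ≠ []) : (pvHpop h).2.length < h.length := by
  have hl : 0 < h.length := List.length_pos_iff.mpr hne
  unfold pvHpop
  split_ifs with h1
  · simpa using hl
  · simp [pvSiftDown_length]
    omega

-- A's while loop: while truckSize > 0 and heap: pop; take; accumulate
def pvALoop (truck ret : Int) (h : List (Int × Int)) : Int :=
  if hc : truck > 0 ∧ h ≠ [] then
    pvALoop (truck - min truck (pvHpop h).1.2)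
      (ret + min truck (pvHpop h).1.2 * ((pvHpop h).1.1 * -1)) (pvHpop h).2
  else ret
termination_by h.length
decreasing_by exact pvHpop_length h hc.2

def maxUnits (num : Int) (boxes : List Int) (unitSize : Int) (unitsPerBox : List Int) (truckSize : Int) : Int :=
  -- for i in range(num): heappush(heap, (-unitsPerBox[i], boxes[i]))
  pvALoop truckSize 0
    ((PySem.List.pyRange 0 num 1).foldl
      (fun hp i => pvHpush hp (-(PySem.List.pyGetD unitsPerBox i 0), PySem.List.pyGetD boxes i 0)) [])

-- ===== PORT B =====
-- the single greedy pass of Source B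
def pvBLoop (pairs : List (Int × Int)) (truck ret : Int) : Int :=
  match pairs with
  | [] => ret
  | (u, b) :: rest =>
    if truck ≤ 0 then ret
    else pvBLoop rest (truck - min truck b) (ret + min truck b * u)

def maxUnits_alt (num : Int) (boxes : List Int) (unitSize : Int) (unitsPerBox : List Int) (truckSize : Int) : Int :=
  -- sorted(((unitsPerBox[i], boxes[i]) for i in range(num)), key=lambda p: (-p[0], p[1]))
  pvBLoop
    (PySem.List.sorted2
      ((PySem.List.pyRange 0 num 1).map
        (fun i => (PySem.List.pyGetD unitsPerBox i 0, PySem.List.pyGetD boxes i 0)))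
      (fun p => -p.1) (fun p => p.2) false)
    truckSize 0

-- ===== PRECONDITION & SPEC =====
-- A raises IndexError exactly when 0 < num exceeds the length of boxes or unitsPerBox; only
-- those inputs are excluded (for num ≤ 0 the loop body never runs and A returns normally).
def Pre_maxUnits (num : Int) (boxes : List Int) (unitSize : Int) (unitsPerBox : List Int) (truckSize : Int) : Prop :=
  num ≤ 0 ∨ (num ≤ (boxes.length : Int) ∧ num ≤ (unitsPerBox.length : Int))
instance (num : Int) (boxes : List Int) (unitSize : Int) (unitsPerBox : List Int) (truckSize : Int) : Decidable (Pre_maxUnits num boxes unitSize unitsPerBox truckSize) := by unfold Pre_maxUnits; infer_instance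

def pvWitness_maxUnits : Int × List Int × Int × List Int × Int := (3, [1, 2, 3], 5, [3, 1, 2], 4)

def Spec_maxUnits (num : Int) (boxes : List Int) (unitSize : Int) (unitsPerBox : List Int) (truckSize : Int) (out : Int) : Prop := out = maxUnits_alt num boxes unitSize unitsPerBox truckSize
instance (num : Int) (boxes : List Int) (unitSize : Int) (unitsPerBox : List Int) (truckSize : Int) (out : Int) : Decidable (Spec_maxUnits num boxes unitSize unitsPerBox truckSize out) := by unfold Spec_maxUnits; infer_instance

-- ===== CLAIM (what is proved, stated in full; the proofs are below) =====
def Claim_equal_maxUnits : Prop := ∀ (num : Int) (boxes : List Int) (unitSize : Int) (unitsPerBox : List Int) (truckSize : Int), Dom_maxUnits num boxes unitSize unitsPerBox truckSize → Pre_maxUnits num boxes unitSize unitsPerBox truckSize → Spec_maxUnits num boxes unitSize unitsPerBox truckSize (maxUnits num boxes unitSize unitsPerBox truckSize)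

-- ===== LEMMAS AND PROOFS =====

-- the (total, antisymmetric) order in which A's heap emits its elements: '≤' on Python int pairs
def pvPle (a b : Int × Int) : Prop := a.1 < b.1 ∨ (a.1 = b.1 ∧ a.2 ≤ b.2)

theorem pvPltB_true {a b : Int × Int} : pvPltB a b = true ↔ (a.1 < b.1 ∨ (a.1 = b.1 ∧ a.2 < b.2)) := by
  simp [pvPltB]

theorem pvPltB_false {a b : Int × Int} : pvPltB a b = false ↔ pvPle b a := by
  rw [← Bool.not_eq_true, pvPltB_true]; unfold pvPle; constructor <;> intro h <;> omega

theorem pvPle_of_pltB {a b : Int × Int} (h : pvPltB a b = true) : pvPle a b := by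
  rw [pvPltB_true] at h; unfold pvPle; omega

theorem pvPle_refl (a : Int × Int) : pvPle a a := by simp [pvPle]

theorem pvPle_trans {a b c : Int × Int} (h1 : pvPle a b) (h2 : pvPle b c) : pvPle a c := by
  unfold pvPle at *; omega

theorem pvPle_antisymm {a b : Int × Int} (h1 : pvPle a b) (h2 : pvPle b a) : a = b := by
  unfold pvPle at *
  have hf : a.1 = b.1 := by omega
  have hs : a.2 = b.2 := by omega
  exact Prod.ext hf hs

-- index arithmetic
theorem pvHpar_lt {i : Nat} (hi : 0 < i) : pvHpar i < i := by unfold pvHpar; omega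

theorem pvHpar_eq {i k : Nat} (h : pvHpar i = k) (hi : 0 < i) : i = 2 * k + 1 ∨ i = 2 * k + 2 := by
  unfold pvHpar at h; omega

-- pvHget facts
theorem pvHget_eq_getElem (h : List (Int × Int)) (i : Nat) (hi : i < h.length) : pvHget h i = h[i] := by
  simp [pvHget, List.getD_eq_getElem?_getD, List.getElem?_eq_getElem hi]

theorem pvHget_hswap (h : List (Int × Int)) (i j k : Nat) (hi : i < h.length) (hj : j < h.length) :
    pvHget (pvHswap h i j) k =
      if k = j then pvHget h i else if k = i then pvHget h j else pvHget h k := by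
  simp only [pvHget, pvHswap, List.getD_eq_getElem?_getD, List.getElem?_set, List.length_set]
  by_cases hkj : k = j
  · subst hkj; simp [hj]
  · by_cases hki : k = i
    · subst hki
      have h1 : ¬ j = k := fun hx => hkj hx.symm
      simp [hi, h1, hkj]
    · have h1 : ¬ j = k := fun hx => hkj hx.symm
      have h2 : ¬ i = k := fun hx => hki hx.symm
      simp [h1, h2, hkj, hki]

-- a swap is a permutation
theorem pvConsSet_perm : ∀ (t : List (Int × Int)) (j : Nat) (a : Int × Int), j < t.length →
    (pvHget t j :: t.set j a).Perm (a :: t) := by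
  intro t
  induction t with
  | nil => intro j a hj; simp at hj
  | cons x s ih =>
    intro j a hj
    cases j with
    | zero => simpa [pvHget] using List.Perm.swap a x s
    | succ j =>
      have hj' : j < s.length := by simpa using hj
      have e1 : (pvHget (x :: s) (j + 1) :: (x :: s).set (j + 1) a)
          = pvHget s j :: x :: s.set j a := by simp [pvHget]
      rw [e1]
      exact ((List.Perm.swap x (pvHget s j) (s.set j a)).trans
        (((ih j a hj').cons x))).trans (List.Perm.swap a x s)

theorem pvHswap_perm : ∀ (h : List (Int × Int)) (i j : Nat), i < h.length → j < h.length →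
    (pvHswap h i j).Perm h := by
  intro h
  induction h with
  | nil => intro i j hi; simp at hi
  | cons x t ih =>
    intro i j hi hj
    cases i with
    | zero =>
      cases j with
      | zero => simp [pvHswap, pvHget]
      | succ j =>
        have hj' : j < t.length := by simpa using hj
        have : pvHswap (x :: t) 0 (j + 1) = pvHget t j :: t.set j x := by
          simp [pvHswap, pvHget]
        rw [this]
        exact pvConsSet_perm t j x hj'
    | succ i =>
      cases j with
      | zero =>
        have hi' : i < t.length := by simpa using hi
        have : pvHswap (x :: t) (i + 1) 0 = pvHget t i :: t.set i x := by
          simp [pvHswap, pvHget]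
        rw [this]
        exact pvConsSet_perm t i x hi'
      | succ j =>
        have hi' : i < t.length := by simpa using hi
        have hj' : j < t.length := by simpa using hj
        have : pvHswap (x :: t) (i + 1) (j + 1) = x :: pvHswap t i j := by
          simp [pvHswap, pvHget]
        rw [this]
        exact (ih i j hi' hj').cons x

-- heap order
def pvIsHeap (h : List (Int × Int)) : Prop :=
  ∀ i, 0 < i → i < h.length → pvPle (pvHget h (pvHpar i)) (pvHget h i)

-- heap except that the edge into pos from its parent may be violated
def pvUpInv (h : List (Int × Int)) (pos : Nat) : Prop :=
  (∀ i, 0 < i → i < h.length → i ≠ pos → pvPle (pvHget h (pvHpar i)) (pvHget h i)) ∧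
  (∀ i, 0 < i → i < h.length → pvHpar i = pos → 0 < pos → pvPle (pvHget h (pvHpar pos)) (pvHget h i))

theorem pvPltB_trans {a b c : Int × Int} (h1 : pvPltB a b = true) (h2 : pvPltB b c = true) :
    pvPltB a c = true := by
  rw [pvPltB_true] at *; omega

theorem pvSiftUp_good : ∀ (h : List (Int × Int)) (pos : Nat), pos < h.length → pvUpInv h pos →
    pvIsHeap (pvSiftUp h pos) ∧ (pvSiftUp h pos).Perm h := by
  intro h pos
  fun_induction pvSiftUp h pos with
  | case1 h =>
    intro hlen hup
    exact ⟨fun i hi0 hilen => hup.1 i hi0 hilen (by omega), List.Perm.refl h⟩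
  | case2 h pos h0 hplt ih =>
    intro hlen hup
    have hpos0 : 0 < pos := Nat.pos_of_ne_zero h0
    have hp : pvHpar pos < pos := pvHpar_lt hpos0
    have hpl : pvHpar pos < h.length := lt_trans hp hlen
    have key : ∀ k, pvHget (pvHswap h pos (pvHpar pos)) k =
        if k = pvHpar pos then pvHget h pos
        else if k = pos then pvHget h (pvHpar pos) else pvHget h k :=
      fun k => pvHget_hswap h pos (pvHpar pos) k hlen hpl
    have hup' : pvUpInv (pvHswap h pos (pvHpar pos)) (pvHpar pos) := by
      constructor
      · intro i hi0 hilen hip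
        rw [pvHswap_length] at hilen
        rw [key, key]
        by_cases hipos : i = pos
        · subst hipos
          rw [if_pos rfl, if_neg (by omega : ¬ i = pvHpar i), if_pos rfl]
          exact pvPle_of_pltB hplt
        · by_cases hpip2 : pvHpar i = pos
          · rw [if_neg (by omega : ¬ pvHpar i = pvHpar pos), if_pos hpip2,
              if_neg hip, if_neg hipos]
            exact hup.2 i hi0 hilen hpip2 hpos0
          · by_cases hpip3 : pvHpar i = pvHpar pos
            · rw [if_pos hpip3, if_neg hip, if_neg hipos]
              have h1 := hup.1 i hi0 hilen hipos
              rw [hpip3] at h1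
              exact pvPle_trans (pvPle_of_pltB hplt) h1
            · rw [if_neg hpip3, if_neg hpip2, if_neg hip, if_neg hipos]
              exact hup.1 i hi0 hilen hipos
      · intro i hi0 hilen hpi hp0
        rw [pvHswap_length] at hilen
        have hpp : pvHpar (pvHpar pos) < pvHpar pos := pvHpar_lt hp0
        have hii : pvHpar i < i := pvHpar_lt hi0
        rw [key, key]
        rw [if_neg (by omega : ¬ pvHpar (pvHpar pos) = pvHpar pos),
          if_neg (by omega : ¬ pvHpar (pvHpar pos) = pos)]
        by_cases hipos : i = pos
        · subst hipos
          rw [if_neg (by omega : ¬ i = pvHpar i), if_pos rfl]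
          exact hup.1 (pvHpar i) hp0 hpl (by omega)
        · rw [if_neg (by omega : ¬ i = pvHpar pos), if_neg hipos]
          have h1 := hup.1 i hi0 hilen hipos
          rw [hpi] at h1
          exact pvPle_trans (hup.1 (pvHpar pos) hp0 hpl (by omega)) h1
    have hlen' : pvHpar pos < (pvHswap h pos (pvHpar pos)).length := by
      rw [pvHswap_length]; exact hpl
    obtain ⟨ihH, ihP⟩ := ih hlen' hup'
    exact ⟨ihH, ihP.trans (pvHswap_perm h pos (pvHpar pos) hlen hpl)⟩
  | case3 h pos h0 hplt =>
    intro hlen hup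
    refine ⟨?_, List.Perm.refl h⟩
    intro i hi0 hilen
    by_cases hipos : i = pos
    · subst hipos
      exact pvPltB_false.mp (by simpa using hplt)
    · exact hup.1 i hi0 hilen hipos

theorem pvHpush_good (h : List (Int × Int)) (x : Int × Int) (hh : pvIsHeap h) :
    pvIsHeap (pvHpush h x) ∧ (pvHpush h x).Perm (h ++ [x]) := by
  unfold pvHpush
  apply pvSiftUp_good (h ++ [x]) h.length (by simp)
  constructor
  · intro i hi0 hilen hine
    have hi' : i < h.length := by simp at hilen; omega
    have hp' : pvHpar i < h.length := lt_trans (pvHpar_lt hi0) hi'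
    have e : ∀ k, k < h.length → pvHget (h ++ [x]) k = pvHget h k := by
      intro k hk; simp [pvHget, List.getElem?_append_left hk]
    rw [e i hi', e _ hp']
    exact hh i hi0 hi'
  · intro i hi0 hilen hpi _
    exfalso
    have := pvHpar_eq hpi hi0
    simp at hilen; omega

-- heap except that the edges out of pos into its children may be violated
def pvDnInv (h : List (Int × Int)) (pos : Nat) : Prop :=
  (∀ i, 0 < i → i < h.length → pvHpar i ≠ pos → pvPle (pvHget h (pvHpar i)) (pvHget h i)) ∧
  (∀ i, 0 < i → i < h.length → pvHpar i = pos → 0 < pos → pvPle (pvHget h (pvHpar pos)) (pvHget h i))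

theorem pvSdChild_cases (h : List (Int × Int)) (pos : Nat) :
    pvSdChild h pos = pos ∨ pvSdChild h pos = 2 * pos + 1 ∨ pvSdChild h pos = 2 * pos + 2 := by
  unfold pvSdChild pvSdChild1
  split_ifs <;> simp

theorem pvSdChild_self (h : List (Int × Int)) (pos : Nat) (hc : pvSdChild h pos = pos) :
    (2 * pos + 1 < h.length → pvPle (pvHget h pos) (pvHget h (2 * pos + 1))) ∧
    (2 * pos + 2 < h.length → pvPle (pvHget h pos) (pvHget h (2 * pos + 2))) := by
  by_cases hA : 2 * pos + 1 < h.length ∧ pvPltB (pvHget h (2 * pos + 1)) (pvHget h pos) = true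
  · exfalso
    simp only [pvSdChild, pvSdChild1, if_pos hA] at hc
    split_ifs at hc <;> omega
  · have e1 : pvSdChild1 h pos = pos := if_neg hA
    constructor
    · intro hl
      have hf : pvPltB (pvHget h (2 * pos + 1)) (pvHget h pos) = false := by
        rcases Bool.eq_false_or_eq_true (pvPltB (pvHget h (2 * pos + 1)) (pvHget h pos)) with hx | hx
        · exact absurd ⟨hl, hx⟩ hA
        · exact hx
      exact pvPltB_false.mp hf
    · intro hr
      simp only [pvSdChild, e1] at hc
      by_cases hB : 2 * pos + 2 < h.length ∧ pvPltB (pvHget h (2 * pos + 2)) (pvHget h pos) = true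
      · rw [if_pos hB] at hc; omega
      · have hf : pvPltB (pvHget h (2 * pos + 2)) (pvHget h pos) = false := by
          rcases Bool.eq_false_or_eq_true (pvPltB (pvHget h (2 * pos + 2)) (pvHget h pos)) with hx | hx
          · exact absurd ⟨hr, hx⟩ hB
          · exact hx
        exact pvPltB_false.mp hf

theorem pvSdChild_ne (h : List (Int × Int)) (pos : Nat) (hc : pvSdChild h pos ≠ pos) :
    pvPltB (pvHget h (pvSdChild h pos)) (pvHget h pos) = true ∧
    (∀ i, 0 < i → i < h.length → pvHpar i = pos → i ≠ pvSdChild h pos →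
      pvPle (pvHget h (pvSdChild h pos)) (pvHget h i)) := by
  by_cases hA : 2 * pos + 1 < h.length ∧ pvPltB (pvHget h (2 * pos + 1)) (pvHget h pos) = true
  · have e1 : pvSdChild1 h pos = 2 * pos + 1 := if_pos hA
    by_cases hB : 2 * pos + 2 < h.length ∧
        pvPltB (pvHget h (2 * pos + 2)) (pvHget h (pvSdChild1 h pos)) = true
    · have e2 : pvSdChild h pos = 2 * pos + 2 := by simp only [pvSdChild, if_pos hB]
      rw [e1] at hB
      rw [e2]
      refine ⟨pvPltB_trans hB.2 hA.2, ?_⟩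
      intro i hi0 hilen hpi hine
      rcases pvHpar_eq hpi hi0 with rfl | rfl
      · exact pvPle_of_pltB hB.2
      · exact absurd rfl hine
    · rw [e1] at hB
      have e2 : pvSdChild h pos = 2 * pos + 1 := by
        simp only [pvSdChild, e1]; rw [if_neg hB]
      rw [e2]
      refine ⟨hA.2, ?_⟩
      intro i hi0 hilen hpi hine
      rcases pvHpar_eq hpi hi0 with rfl | rfl
      · exact absurd rfl hine
      · have hf : pvPltB (pvHget h (2 * pos + 2)) (pvHget h (2 * pos + 1)) = false := by
          rcases Bool.eq_false_or_eq_true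
            (pvPltB (pvHget h (2 * pos + 2)) (pvHget h (2 * pos + 1))) with hx | hx
          · exact absurd ⟨hilen, hx⟩ hB
          · exact hx
        exact pvPltB_false.mp hf
  · have e1 : pvSdChild1 h pos = pos := if_neg hA
    by_cases hB : 2 * pos + 2 < h.length ∧
        pvPltB (pvHget h (2 * pos + 2)) (pvHget h (pvSdChild1 h pos)) = true
    · have e2 : pvSdChild h pos = 2 * pos + 2 := by simp only [pvSdChild, if_pos hB]
      rw [e1] at hB
      rw [e2]
      refine ⟨hB.2, ?_⟩
      intro i hi0 hilen hpi hine
      rcases pvHpar_eq hpi hi0 with rfl | rfl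
      · have hf : pvPltB (pvHget h (2 * pos + 1)) (pvHget h pos) = false := by
          rcases Bool.eq_false_or_eq_true
            (pvPltB (pvHget h (2 * pos + 1)) (pvHget h pos)) with hx | hx
          · exact absurd ⟨hilen, hx⟩ hA
          · exact hx
        exact pvPle_trans (pvPle_of_pltB hB.2) (pvPltB_false.mp hf)
      · exact absurd rfl hine
    · exfalso
      rw [e1] at hB
      exact hc (by simp only [pvSdChild, e1]; rw [if_neg hB])

theorem pvSiftDown_good : ∀ (h : List (Int × Int)) (pos : Nat), pvDnInv h pos →
    pvIsHeap (pvSiftDown h pos) ∧ (pvSiftDown h pos).Perm h := by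
  intro h pos
  fun_induction pvSiftDown h pos with
  | case1 h pos hc =>
    intro hdn
    refine ⟨?_, List.Perm.refl h⟩
    intro i hi0 hilen
    by_cases hpi : pvHpar i = pos
    · obtain ⟨hl, hr⟩ := pvSdChild_self h pos hc
      rw [hpi]
      rcases pvHpar_eq hpi hi0 with rfl | rfl
      · exact hl hilen
      · exact hr hilen
    · exact hdn.1 i hi0 hilen hpi
  | case2 h pos hc ih =>
    intro hdn
    obtain ⟨hposc, hclen⟩ := pvSdChild_lt h pos hc
    obtain ⟨hplt, hother⟩ := pvSdChild_ne h pos hc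
    set c := pvSdChild h pos with hcdef
    have hposlen : pos < h.length := lt_trans hposc hclen
    have hparc : pvHpar c = pos := by
      rcases pvSdChild_cases h pos with hx | hx | hx
      · exact absurd hx hc
      · rw [← hcdef] at hx; rw [hx]; unfold pvHpar; omega
      · rw [← hcdef] at hx; rw [hx]; unfold pvHpar; omega
    have key : ∀ k, pvHget (pvHswap h pos c) k =
        if k = c then pvHget h pos else if k = pos then pvHget h c else pvHget h k :=
      fun k => pvHget_hswap h pos c k hposlen hclen
    have hdn' : pvDnInv (pvHswap h pos c) c := by
      constructor
      · intro i hi0 hilen hpic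
        rw [pvHswap_length] at hilen
        rw [key, key]
        by_cases hip : i = pos
        · have hpos0 : 0 < pos := hip ▸ hi0
          have hpp : pvHpar pos < pos := pvHpar_lt hpos0
          rw [hip]
          rw [if_neg (by omega : ¬ pvHpar pos = c), if_neg (by omega : ¬ pvHpar pos = pos),
            if_neg (by omega : ¬ pos = c), if_pos rfl]
          exact hdn.2 c (by omega) hclen hparc hpos0
        · by_cases hic : i = c
          · subst hic
            rw [hparc]
            rw [if_neg (by omega : ¬ pos = c), if_pos rfl, if_pos rfl]
            exact pvPle_of_pltB hplt
          · by_cases hpip : pvHpar i = pos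
            · rw [if_neg hpic, if_pos hpip, if_neg hic, if_neg hip]
              exact hother i hi0 hilen hpip hic
            · rw [if_neg hpic, if_neg hpip, if_neg hic, if_neg hip]
              exact hdn.1 i hi0 hilen hpip
      · intro i hi0 hilen hpi _
        rw [pvHswap_length] at hilen
        have hii : pvHpar i < i := pvHpar_lt hi0
        have hic : i ≠ c := by omega
        have hipos : i ≠ pos := by omega
        rw [key, key, hparc]
        rw [if_neg (by omega : ¬ pos = c), if_pos rfl, if_neg hic, if_neg hipos]
        have h1 := hdn.1 i hi0 hilen (by rw [hpi]; exact hc)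
        rw [hpi] at h1
        exact h1
    obtain ⟨ihH, ihP⟩ := ih hdn'
    exact ⟨ihH, ihP.trans (pvHswap_perm h pos c hposlen hclen)⟩

theorem pvHpop_good (h : List (Int × Int)) (hh : pvIsHeap h) (hne : h ≠ []) :
    (pvHpop h).1 = pvHget h 0 ∧ pvIsHeap (pvHpop h).2 ∧ ((pvHpop h).1 :: (pvHpop h).2).Perm h := by
  have hl : 0 < h.length := List.length_pos_iff.mpr hne
  unfold pvHpop
  split_ifs with h1
  · have hlen1 : h.length = 1 := by omega
    obtain ⟨a, ha⟩ := List.length_eq_one_iff.mp hlen1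
    subst ha
    refine ⟨rfl, ?_, ?_⟩
    · intro i hi0 hilen; simp at hilen
    · simp [pvHget]
  · have h2 : 2 ≤ h.length := by omega
    have htake : ∀ k, k < h.length - 1 →
        pvHget ((h.take (h.length - 1)).set 0 (pvHget h (h.length - 1))) k =
        if k = 0 then pvHget h (h.length - 1) else pvHget h k := by
      intro k hk
      simp only [pvHget, List.getD_eq_getElem?_getD, List.getElem?_set, List.length_take]
      by_cases hk0 : k = 0
      · subst hk0
        have hmin : 0 < min (h.length - 1) h.length := by omega
        have h1' : 1 < h.length := by omega
        simp [hmin, h1']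
      · have hne0 : ¬ (0 = k) := fun hx => hk0 hx.symm
        simp only [hne0, if_false, if_neg hk0, List.getElem?_take_of_lt hk]
    have hdn : pvDnInv ((h.take (h.length - 1)).set 0 (pvHget h (h.length - 1))) 0 := by
      constructor
      · intro i hi0 hilen hpi
        have hilen' : i < h.length - 1 := by
          simpa using hilen
        have hp0 : 0 < pvHpar i := Nat.pos_of_ne_zero hpi
        have hplti : pvHpar i < i := pvHpar_lt hi0
        rw [htake i hilen', htake (pvHpar i) (by omega), if_neg (by omega : ¬ i = 0),
          if_neg (by omega : ¬ pvHpar i = 0)]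
        exact hh i hi0 (by omega)
      · intro i _ _ _ hpos0
        exact absurd hpos0 (lt_irrefl 0)
    obtain ⟨hH2, hP2⟩ := pvSiftDown_good _ 0 hdn
    refine ⟨rfl, hH2, ?_⟩
    refine ((hP2.cons (pvHget h 0))).trans ?_
    -- (pvHget h 0 :: (take (n-1) h).set 0 (pvHget h (n-1))).Perm h
    cases h with
    | nil => simp at hl
    | cons a t =>
      have htne : t ≠ [] := by
        intro hx; subst hx; simp at h2
      obtain ⟨m, hm⟩ : ∃ m, t.length = m + 1 := by
        cases t with
        | nil => exact absurd rfl htne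
        | cons b s => exact ⟨s.length, rfl⟩
      have e0 : pvHget (a :: t) 0 = a := by simp [pvHget]
      have hr : (a :: t).length - 1 < (a :: t).length := by simp
      have elast : pvHget (a :: t) ((a :: t).length - 1) = t.getLast htne := by
        rw [pvHget_eq_getElem _ _ hr, ← List.getLast_eq_getElem (by simp : (a :: t) ≠ [])]
        exact List.getLast_cons htne
      have etake : (a :: t).take ((a :: t).length - 1) = a :: t.dropLast := by
        have : (a :: t).length - 1 = m + 1 := by simp [hm]
        rw [this, List.take_succ_cons, List.dropLast_eq_take, hm]
        simp
      rw [e0, elast, etake]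
      show (a :: t.getLast htne :: t.dropLast).Perm (a :: t)
      refine List.Perm.cons a ?_
      have hp := List.perm_append_singleton (t.getLast htne) t.dropLast
      rw [List.dropLast_append_getLast htne] at hp
      exact hp.symm

theorem pvHeap_min (h : List (Int × Int)) (hh : pvIsHeap h) :
    ∀ i, i < h.length → pvPle (pvHget h 0) (pvHget h i) := by
  intro i
  induction i using Nat.strong_induction_on with
  | _ i ih =>
    intro hi
    rcases Nat.eq_zero_or_pos i with h0 | h0
    · subst h0; exact pvPle_refl _
    · exact pvPle_trans (ih (pvHpar i) (pvHpar_lt h0) (lt_trans (pvHpar_lt h0) hi)) (hh i h0 hi)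

-- the sequence of values A's pop loop would emit
def pvPopSeq (h : List (Int × Int)) : List (Int × Int) :=
  if hh : h = [] then [] else (pvHpop h).1 :: pvPopSeq (pvHpop h).2
termination_by h.length
decreasing_by exact pvHpop_length h hh

theorem pvPopSeq_good_aux : ∀ (n : Nat) (h : List (Int × Int)), h.length ≤ n → pvIsHeap h →
    (pvPopSeq h).Perm h ∧ (pvPopSeq h).Pairwise pvPle := by
  intro n
  induction n with
  | zero =>
    intro h hlen _
    have : h = [] := List.eq_nil_of_length_eq_zero (by omega)
    subst this
    rw [pvPopSeq]
    simp
  | succ n ih =>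
    intro h hlen hh
    by_cases hne : h = []
    · subst hne; rw [pvPopSeq]; simp
    · rw [pvPopSeq, dif_neg hne]
      obtain ⟨e1, hH2, hP⟩ := pvHpop_good h hh hne
      have hlen2 : (pvHpop h).2.length ≤ n := by
        have := pvHpop_length h hne; omega
      obtain ⟨ihP, ihPW⟩ := ih _ hlen2 hH2
      constructor
      · exact (ihP.cons _).trans hP
      · refine List.pairwise_cons.mpr ⟨?_, ihPW⟩
        intro y hy
        have hy2 : y ∈ (pvHpop h).2 := ihP.subset hy
        have hyh : y ∈ h := hP.subset (List.mem_cons_of_mem _ hy2)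
        obtain ⟨i, hi, hei⟩ := List.mem_iff_getElem.mp hyh
        have hmin := pvHeap_min h hh i hi
        rw [pvHget_eq_getElem h i hi, hei] at hmin
        rw [e1]
        exact hmin

theorem pvPopSeq_good (h : List (Int × Int)) (hh : pvIsHeap h) :
    (pvPopSeq h).Perm h ∧ (pvPopSeq h).Pairwise pvPle :=
  pvPopSeq_good_aux h.length h le_rfl hh

theorem pvBuild_good : ∀ (M : List (Int × Int)) (h0 : List (Int × Int)), pvIsHeap h0 →
    pvIsHeap (M.foldl pvHpush h0) ∧ (M.foldl pvHpush h0).Perm (h0 ++ M) := by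
  intro M
  induction M with
  | nil => intro h0 hh; exact ⟨hh, by simp⟩
  | cons x M ih =>
    intro h0 hh
    obtain ⟨hpH, hpP⟩ := pvHpush_good h0 x hh
    obtain ⟨ihH, ihP⟩ := ih (pvHpush h0 x) hpH
    refine ⟨ihH, ?_⟩
    have : ((pvHpush h0 x) ++ M).Perm ((h0 ++ [x]) ++ M) := hpP.append_right M
    have e : (h0 ++ [x]) ++ M = h0 ++ x :: M := by simp
    simpa [e] using ihP.trans this

-- the common shape of both loops, over the emitted sequence of (-units, boxes) pairs
def pvScan (qs : List (Int × Int)) (t ret : Int) : Int :=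
  match qs with
  | [] => ret
  | q :: rest => if t ≤ 0 then ret else pvScan rest (t - min t q.2) (ret + min t q.2 * (q.1 * -1))

theorem pvALoop_eq_scan : ∀ (n : Nat) (h : List (Int × Int)) (t ret : Int), h.length ≤ n →
    pvIsHeap h → pvALoop t ret h = pvScan (pvPopSeq h) t ret := by
  intro n
  induction n with
  | zero =>
    intro h t ret hlen _
    have : h = [] := List.eq_nil_of_length_eq_zero (by omega)
    subst this
    rw [pvALoop, pvPopSeq]
    simp [pvScan]
  | succ n ih =>
    intro h t ret hlen hh
    by_cases hne : h = []
    · subst hne; rw [pvALoop, pvPopSeq]; simp [pvScan]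
    · rw [pvALoop, pvPopSeq, dif_neg hne]
      by_cases ht : t > 0
      · rw [dif_pos ⟨ht, hne⟩]
        have ht2 : ¬ t ≤ 0 := by omega
        simp only [pvScan, ht2, if_false]
        exact ih _ _ _ (by have := pvHpop_length h hne; omega) (pvHpop_good h hh hne).2.1
      · rw [dif_neg (by tauto : ¬ (t > 0 ∧ h ≠ []))]
        have ht2 : t ≤ 0 := by omega
        simp [pvScan, ht2]

theorem pvBLoop_eq_scan : ∀ (pairs : List (Int × Int)) (t ret : Int),
    pvBLoop pairs t ret = pvScan (pairs.map (fun p => (-p.1, p.2))) t ret := by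
  intro pairs
  induction pairs with
  | nil => intro t ret; rfl
  | cons p rest ih =>
    intro t ret
    obtain ⟨u, b⟩ := p
    simp only [pvBLoop, List.map_cons, pvScan]
    have e : (-u) * -1 = u := by ring
    rw [e]
    split_ifs with ht
    · rfl
    · exact ih _ _

-- a pvPle-sorted permutation is unique
theorem pvSorted_unique : ∀ (l1 l2 : List (Int × Int)), l1.Perm l2 →
    l1.Pairwise pvPle → l2.Pairwise pvPle → l1 = l2 := by
  intro l1
  induction l1 with
  | nil => intro l2 hp _ _; exact (hp.nil_eq).symm ▸ rfl
  | cons a t ih =>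
    intro l2 hp h1 h2
    cases l2 with
    | nil => exact absurd hp.symm.nil_eq (by simp)
    | cons b s =>
      have hab : a = b := by
        have ha : a ∈ b :: s := hp.mem_iff.mp (List.mem_cons_self)
        have hb : b ∈ a :: t := hp.mem_iff.mpr (List.mem_cons_self)
        rcases List.mem_cons.mp ha with h | ha'
        · exact h
        · rcases List.mem_cons.mp hb with h | hb'
          · exact h.symm
          · exact pvPle_antisymm ((List.pairwise_cons.mp h1).1 b hb')
              ((List.pairwise_cons.mp h2).1 a ha')
      subst hab
      have ht : t = s := ih s (hp.cons_inv) (List.pairwise_cons.mp h1).2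
        (List.pairwise_cons.mp h2).2
      rw [ht]

theorem pvInsertBy_pw {α : Type} (lt : α → α → Bool) (R : α → α → Prop)
    (hT : ∀ a b, lt a b = true → R a b) (hF : ∀ a b, lt a b = false → R b a)
    (htr : ∀ {a b c}, R a b → R b c → R a c) :
    ∀ (x : α) (ys : List α), ys.Pairwise R → (PySem.List.insertBy lt x ys).Pairwise R := by
  intro x ys
  induction ys with
  | nil => intro _; simp [PySem.List.insertBy]
  | cons y ys ih =>
    intro hpw
    obtain ⟨hy, hys⟩ := List.pairwise_cons.mp hpw
    by_cases hlt : lt x y = true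
    · have e : PySem.List.insertBy lt x (y :: ys) = x :: y :: ys := by
        simp [PySem.List.insertBy, hlt]
      rw [e]
      refine List.pairwise_cons.mpr ⟨?_, hpw⟩
      intro z hz
      rcases List.mem_cons.mp hz with rfl | hz'
      · exact hT _ _ hlt
      · exact htr (hT _ _ hlt) (hy z hz')
    · have hltf : lt x y = false := by simpa using hlt
      have e : PySem.List.insertBy lt x (y :: ys) = y :: PySem.List.insertBy lt x ys := by
        simp [PySem.List.insertBy, hltf]
      rw [e]
      refine List.pairwise_cons.mpr ⟨?_, ih hys⟩
      intro z hz
      rcases (PySem.List.insertBy_mem_iff lt x z ys).mp hz with rfl | hz'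
      · exact hF _ _ hltf
      · exact hy z hz'

-- B's sort emits the pairs so that their negations are pvPle-sorted
theorem pvSorted2_pairwise (xs : List (Int × Int)) :
    (PySem.List.sorted2 xs (fun p => -p.1) (fun p => p.2) false).Pairwise
      (fun a b => pvPle (-a.1, a.2) (-b.1, b.2)) := by
  show (List.foldl (fun acc x => PySem.List.insertBy _ x acc) [] xs).Pairwise _
  have hfold : ∀ (l : List (Int × Int)) (acc : List (Int × Int)),
      acc.Pairwise (fun a b => pvPle (-a.1, a.2) (-b.1, b.2)) →
      (List.foldl (fun acc x => PySem.List.insertBy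
        (fun a b => decide (-a.1 < -b.1) || (!decide (-b.1 < -a.1) && decide (a.2 < b.2)))
        x acc) acc l).Pairwise (fun a b => pvPle (-a.1, a.2) (-b.1, b.2)) := by
    intro l
    induction l with
    | nil => intro acc hacc; exact hacc
    | cons x l ih =>
      intro acc hacc
      refine ih _ (pvInsertBy_pw _ _ ?_ ?_ ?_ x acc hacc)
      · intro a b hab
        simp only [Bool.or_eq_true, Bool.and_eq_true, decide_eq_true_eq,
          Bool.not_eq_eq_eq_not, Bool.not_true, decide_eq_false_iff_not] at hab
        unfold pvPle
        simp only []
        omega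
      · intro a b hab
        have hR : (-b.1 < -a.1) ∨ ((-b.1 : Int) = -a.1 ∧ b.2 ≤ a.2) := by
          by_cases p1 : -a.1 < -b.1
          · simp [p1] at hab
          · by_cases p2 : -b.1 < -a.1
            · exact Or.inl p2
            · by_cases p3 : a.2 < b.2
              · simp [p1, p2, p3] at hab
              · right; omega
        simpa [pvPle] using hR
      · intro a b c h1 h2
        exact pvPle_trans h1 h2
  exact hfold xs [] (List.Pairwise.nil)

theorem pvRange_nonpos (num : Int) (h : num ≤ 0) : PySem.List.pyRange 0 num 1 = [] := by
  have h1 : ¬ (0 : Int) < num := by omega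
  simp [PySem.List.pyRange, h1]

-- ===== VERDICT (by name: the statement is the Claim_ definition above) =====
theorem pvIsHeap_nil : pvIsHeap [] := by
  intro i hi0 hilen
  simp at hilen

theorem maxUnits_spec : Claim_equal_maxUnits := by
  intro num boxes unitSize unitsPerBox truckSize _ hpre
  unfold Spec_maxUnits maxUnits maxUnits_alt
  by_cases hnum : num ≤ 0
  · rw [pvRange_nonpos num hnum]
    rw [pvALoop]
    simp [pvBLoop, PySem.List.sorted2]
  · push_neg at hnum
    have hb : num ≤ (boxes.length : Int) := by
      rcases hpre with h | ⟨h1, h2⟩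
      · omega
      · exact h1
    have hu : num ≤ (unitsPerBox.length : Int) := by
      rcases hpre with h | ⟨h1, h2⟩
      · omega
      · exact h2
    have hnn : (num.toNat : Int) = num := Int.toNat_of_nonneg (by omega)
    set n := num.toNat with hn
    rw [← hnn, PySem.List.pyRange_zero_natCast]
    rw [List.foldl_map, List.map_map]
    simp only [Function.comp, PySem.List.pyGetD_natCast]
    -- name the pair lists
    set M : List (Int × Int) := (List.range n).map
      (fun k => (unitsPerBox.getD k 0, boxes.getD k 0)) with hM
    set L : List (Int × Int) := (List.range n).map
      (fun k => (-(unitsPerBox.getD k 0), boxes.getD k 0)) with hL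
    have hLfold : (List.range n).foldl
        (fun hp k => pvHpush hp (-(unitsPerBox.getD k 0), boxes.getD k 0)) [] =
        L.foldl pvHpush [] := by
      rw [hL, List.foldl_map]
    have hLM : L = M.map (fun p => (-p.1, p.2)) := by
      rw [hL, hM, List.map_map]
      simp [Function.comp]
    rw [hLfold]
    obtain ⟨hHeap, hHPerm⟩ := pvBuild_good L [] pvIsHeap_nil
    set H := L.foldl pvHpush [] with hH
    have hHPerm' : H.Perm L := by simpa using hHPerm
    obtain ⟨hPopPerm, hPopPW⟩ := pvPopSeq_good H hHeap
    rw [pvALoop_eq_scan H.length H truckSize 0 le_rfl hHeap]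
    rw [pvBLoop_eq_scan]
    set pairs := PySem.List.sorted2 M (fun p => -p.1) (fun p => p.2) false with hpairs
    have hPW2 : (pairs.map (fun p => (-p.1, p.2))).Pairwise pvPle := by
      rw [List.pairwise_map]
      exact pvSorted2_pairwise M
    have hPerm2 : (pairs.map (fun p => (-p.1, p.2))).Perm L := by
      rw [hLM]
      exact (PySem.List.sorted2_perm M _ _ false).map _
    have heq : pvPopSeq H = pairs.map (fun p => (-p.1, p.2)) :=
      pvSorted_unique _ _ (hPopPerm.trans (hHPerm'.trans hPerm2.symm)) hPopPW hPW2
    rw [heq]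
    have hMeq : List.map ((fun i => (PySem.List.pyGetD unitsPerBox i 0,
        PySem.List.pyGetD boxes i 0)) ∘ fun k => ((k : Nat) : Int)) (List.range n) = M := by
      rw [hM]
      simp [Function.comp, PySem.List.pyGetD_natCast]
    rw [hMeq]
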